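-- pv_equiv track=rewrite | github.com/macfreek/puzzle-code | permutations.py | homogeneousMutations
-- ===== SOURCE A (Python) =====
-- def uniqueCombinations(items, n):
--     """uniqueCombinations takes an unordered set of n distinct elements from the sequence.
--     combination without replacement
--     Example: Unique Combinations of 2 letters from 'ABCD':
--     AB AC AD BC BD CD
--     uniqueCombinations() is similar to itertools.combinations(), but is guaranteed to
--     work for infinite iterators.
--     For example, an iteration of 3-dimensional integers yields
--     (1,2,3) (1,2,4) (1,3,4) (2,3,4) (1,2,5) (1,3,5) (2,3,5) (1,4,5) (2,4,5) (3,4,5) ...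
--     Compare this to itertools.combinations(), which would yield
--     (1,2,3) (1,2,4) (1,2,5) (1,2,6) (1,2,7) .... and never reach e.g. (1,3,4).
--     """
--     if n==0:
--         yield []
--     else:
--         saved = []
--         for item in items:
--             for cc in uniqueCombinations(saved, n-1):
--                 yield cc+[item]
--             saved.append(item)
--
-- def homogeneousMutations(items, n, replaceitems):
--     """homogeneousMutations are sequences where n items are replaced by the same other item, given in replaceitems.
--     Example: Mutations of 2 letters from 'ABCD', with 'G','H' as possible replacements:
--     GGCD HHCD GBGD HBHD GBCG HBCH AGGD AHHD AGCG AHCH ABGG ABHH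
--     """
--     if n == 0:
--         yield items
--     else:
--         idx = range(len(items))
--         for p in uniqueCombinations(idx,n):
--             for alt in replaceitems:
--                 newitems = items[:]
--                 for i in p:
--                     newitems[i] = alt
--                 yield newitems
-- ===== SOURCE B (Python) =====
-- def homogeneousMutations(items, n, replaceitems):
--     """Dynamic-programming re-implementation: build the colex-ordered index
--     combinations bottom-up in a table instead of re-running the recursive
--     generator, then apply each replacement."""
--     if n == 0:
--         yield items
--         return
--     if n < 0 or n > len(items):
--         return
--     # table[k] = combinations of k positions among those processed so far,
--     # in the same 'diagonal' (colexicographic) order as A produces.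
--     table = [[[]]] + [[] for _ in range(n)]
--     for m in range(len(items)):
--         table = [table[0]] + [table[k] + [c + [m] for c in table[k - 1]]
--                               for k in range(1, n + 1)]
--     for p in table[n]:
--         for alt in replaceitems:
--             newitems = items[:]
--             for i in p:
--                 newitems[i] = alt
--             yield newitems
-- ===== Notes on version B (the rewrite author's own statement) =====
-- stated objective: alternative
-- what changed: Replaces A's naive recursive generator uniqueCombinations (which re-enumerates the combinations of every prefix from scratch) by a bottom-up dynamic-programming table, built in one left-to-right pass over the positions, whose k-th row holds the k-element index combinations seen so far in the same colex order; the replacement loop over combinations and replacement items is unchanged.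
import Mathlib
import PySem

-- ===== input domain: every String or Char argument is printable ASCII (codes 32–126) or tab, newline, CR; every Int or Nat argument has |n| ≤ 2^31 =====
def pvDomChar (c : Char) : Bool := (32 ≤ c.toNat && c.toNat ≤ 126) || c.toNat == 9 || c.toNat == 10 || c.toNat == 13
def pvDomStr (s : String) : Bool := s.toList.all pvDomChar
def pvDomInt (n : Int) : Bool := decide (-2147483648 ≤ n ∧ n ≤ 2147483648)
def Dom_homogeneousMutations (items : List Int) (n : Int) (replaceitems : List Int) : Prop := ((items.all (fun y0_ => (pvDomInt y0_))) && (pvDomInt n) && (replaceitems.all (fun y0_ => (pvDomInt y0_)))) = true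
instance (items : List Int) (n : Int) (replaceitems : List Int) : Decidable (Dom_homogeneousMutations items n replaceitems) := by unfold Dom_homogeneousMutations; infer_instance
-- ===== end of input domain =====

-- B replaces A's naive recursive generator of index combinations by a bottom-up
-- dynamic-programming table built in one pass over the positions (objective:
-- alternative algorithm, not claimed faster); the replacement loop is unchanged.

-- ===== PORT A =====
-- A's generators are materialised as lists (a yield = one appended element).
mutual
  -- uniqueCombinations(items, n)
  def uniqueCombinations (items : List Int) (n : Int) : List (List Int) :=
    if n = 0 then [[]]
    else ucLoop items [] n
  termination_by ((items.length, 1, 0) : Nat ×ₗ Nat ×ₗ Nat)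
  decreasing_by
    simp only [List.length_nil, Nat.zero_add]
    exact Prod.Lex.right _ (Prod.Lex.left _ _ (by omega))
  -- the 'for item in items' loop of uniqueCombinations, with its 'saved' accumulator
  def ucLoop (rem : List Int) (saved : List Int) (n : Int) : List (List Int) :=
    match rem with
    | [] => []
    | item :: rest =>
        ((uniqueCombinations saved (n - 1)).map (fun cc => cc ++ [item]))
          ++ ucLoop rest (saved ++ [item]) n
  termination_by ((saved.length + rem.length, 0, rem.length) : Nat ×ₗ Nat ×ₗ Nat)
  decreasing_by
    all_goals simp only [List.length_append, List.length_cons, List.length_nil, Nat.zero_add]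
    · exact Prod.Lex.left _ _ (by omega)
    · rw [show saved.length + 1 + rest.length = saved.length + (rest.length + 1) from by omega]
      exact Prod.Lex.right _ (Prod.Lex.right _ (by omega))
end

def homogeneousMutations (items : List Int) (n : Int) (replaceitems : List Int) : List (List Int) :=
  if n = 0 then [items]
  else
    -- idx = range(len(items)); indices drawn from it are always valid, so the
    -- in-place assignments newitems[i] = alt are PySem.List.pySetD (exact here)
    (uniqueCombinations (PySem.List.pyRange 0 (items.length : Int) 1) n).flatMap (fun p =>
      replaceitems.map (fun alt =>
        p.foldl (fun newitems i => PySem.List.pySetD newitems i alt) items))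

-- ===== PORT B =====
-- table[k] + [c + [m] for c in table[k-1]]  (one entry of the rebuilt table)
def hmRow (m : Int) (prev cur : List (List Int)) : List (List Int) :=
  cur ++ prev.map (fun c => c ++ [m])

-- the comprehension 'for k in range(1, n+1)', walking (table[k-1], table[k]) pairs
def hmInner (m : Int) (prev : List (List Int)) : List (List (List Int)) → List (List (List Int))
  | [] => []
  | cur :: rest => hmRow m prev cur :: hmInner m cur rest

-- table = [table[0]] + [table[k] + [c + [m] for c in table[k-1]] for k in range(1, n+1)]
def hmStep (m : Int) (table : List (List (List Int))) : List (List (List Int)) :=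
  match table with
  | [] => []
  | t0 :: rest => t0 :: hmInner m t0 rest

def homogeneousMutations_alt (items : List Int) (n : Int) (replaceitems : List Int) : List (List Int) :=
  if n = 0 then [items]
  else if n < 0 ∨ n > (items.length : Int) then []
  else
    -- table = [[[]]] + [[] for _ in range(n)], then one DP pass over the positions
    let table := (PySem.List.pyRange 0 (items.length : Int) 1).foldl
      (fun tb m => hmStep m tb) ([[]] :: List.replicate n.toNat [])
    (PySem.List.pyGetD table n []).flatMap (fun p =>
      replaceitems.map (fun alt =>
        p.foldl (fun newitems i => PySem.List.pySetD newitems i alt) items))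

-- ===== PRECONDITION & SPEC =====
def Spec_homogeneousMutations (items : List Int) (n : Int) (replaceitems : List Int) (out : List (List Int)) : Prop := out = homogeneousMutations_alt items n replaceitems
instance (items : List Int) (n : Int) (replaceitems : List Int) (out : List (List Int)) : Decidable (Spec_homogeneousMutations items n replaceitems out) := by unfold Spec_homogeneousMutations; infer_instance

-- ===== CLAIM (what is proved, stated in full; the proofs are below) =====
def Claim_equal_homogeneousMutations : Prop := ∀ (items : List Int) (n : Int) (replaceitems : List Int), Dom_homogeneousMutations items n replaceitems → Spec_homogeneousMutations items n replaceitems (homogeneousMutations items n replaceitems)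

-- ===== LEMMAS AND PROOFS =====

-- the combinations of k indices among 0..m-1, in A's 'diagonal' (colex) order
def ucC : Nat → Nat → List (List Int)
  | _, 0 => [[]]
  | 0, _+1 => []
  | m+1, k+1 => ucC m (k+1) ++ (ucC m k).map (fun c => c ++ [(m : Int)])

-- A yields nothing for negative n (the recursion bottoms out on the empty 'saved')
theorem uc_neg_aux : ∀ (N : Nat),
    (∀ (items : List Int) (k : Int), items.length ≤ N → k < 0 → uniqueCombinations items k = [])
    ∧ (∀ (rem saved : List Int) (k : Int), saved.length + rem.length ≤ N → k < 0 → ucLoop rem saved k = []) := by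
  intro N
  induction N with
  | zero =>
    constructor
    · intro items k hlen hk
      have : items = [] := List.eq_nil_of_length_eq_zero (by omega)
      subst this
      rw [uniqueCombinations, if_neg (by omega), ucLoop]
    · intro rem saved k hlen hk
      have : rem = [] := List.eq_nil_of_length_eq_zero (by omega)
      subst this
      rw [ucLoop]
  | succ N ih =>
    have hLoop : ∀ (rem saved : List Int) (k : Int),
        saved.length + rem.length ≤ N + 1 → k < 0 → ucLoop rem saved k = [] := by
      intro rem
      induction rem with
      | nil => intro saved k _ _; rw [ucLoop]
      | cons x rest ihr =>
        intro saved k hlen hk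
        rw [ucLoop]
        have h1 : uniqueCombinations saved (k - 1) = [] :=
          ih.1 saved (k - 1) (by simp at hlen; omega) (by omega)
        have h2 : ucLoop rest (saved ++ [x]) k = [] :=
          ihr (saved ++ [x]) k (by simp at hlen ⊢; omega) hk
        simp [h1, h2]
    refine ⟨?_, hLoop⟩
    intro items k hlen hk
    rw [uniqueCombinations, if_neg (by omega)]
    exact hLoop items [] k (by simpa using hlen) hk

theorem uc_neg (items : List Int) (k : Int) (hk : k < 0) : uniqueCombinations items k = [] :=
  (uc_neg_aux items.length).1 items k le_rfl hk

-- the loop of uniqueCombinations over an integer segment, 'saved' being the prefix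
theorem ucLoop_seg : ∀ (cnt m : Nat) (k : Int),
    ucLoop ((List.range' m cnt).map (fun (j : Nat) => (j : Int))) ((List.range m).map (fun (j : Nat) => (j : Int))) k
      = (List.range' m cnt).flatMap (fun j =>
          (uniqueCombinations ((List.range j).map (fun (j' : Nat) => (j' : Int))) (k - 1)).map
            (fun cc => cc ++ [(j : Int)])) := by
  intro cnt
  induction cnt with
  | zero => intro m k; simp [ucLoop]
  | succ c ihc =>
    intro m k
    rw [List.range'_succ]
    simp only [List.map_cons, List.flatMap_cons]
    rw [ucLoop]
    have hsv : (List.range m).map (fun (j : Nat) => (j : Int)) ++ [(m : Int)]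
        = (List.range (m + 1)).map (fun (j : Nat) => (j : Int)) := by
      rw [List.range_succ]; simp
    rw [hsv, ihc (m + 1) k]

-- the defining recurrence of colex order, unrolled over the last element
theorem ucC_flat : ∀ (m k : Nat),
    ucC m (k + 1) = (List.range m).flatMap (fun j => (ucC j k).map (fun c => c ++ [(j : Int)])) := by
  intro m k
  induction m with
  | zero => simp [ucC]
  | succ m ihm =>
    rw [List.range_succ, List.flatMap_append, ← ihm]
    simp [ucC]

-- there are no k-combinations of fewer than k positions
theorem ucC_big : ∀ (m k : Nat), m < k → ucC m k = [] := by
  intro m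
  induction m with
  | zero => intro k hk; obtain ⟨k', rfl⟩ : ∃ k', k = k' + 1 := ⟨k - 1, by omega⟩; simp [ucC]
  | succ m ihm =>
    intro k hk
    obtain ⟨k', rfl⟩ : ∃ k', k = k' + 1 := ⟨k - 1, by omega⟩
    rw [ucC, ihm (k' + 1) (by omega), ihm k' (by omega)]
    simp
theorem uc_eq : ∀ (k m : Nat),
    uniqueCombinations ((List.range m).map (fun (j : Nat) => (j : Int))) (k : Int) = ucC m k := by
  intro k
  induction k with
  | zero => intro m; rw [uniqueCombinations]; simp [ucC]
  | succ k ihk =>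
    intro m
    rw [uniqueCombinations, if_neg (by push_cast; omega)]
    have h0 : ([] : List Int) = (List.range 0).map (fun (j : Nat) => (j : Int)) := by simp
    rw [List.range_eq_range', h0, ucLoop_seg m 0 ((k + 1 : Nat) : Int), ← List.range_eq_range',
      ucC_flat]
    rw [List.flatMap_def, List.flatMap_def]
    congr 1
    apply List.map_congr_left
    intro j _
    have hc : ((k + 1 : Nat) : Int) - 1 = ((k : Nat) : Int) := by push_cast; ring
    rw [hc, ihk j]

theorem hmInner_map (mi : Int) (f : Nat → List (List Int)) : ∀ (s a : Nat),
    hmInner mi (f a) ((List.range' (a + 1) s).map f)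
      = (List.range' (a + 1) s).map (fun k => hmRow mi (f (k - 1)) (f k)) := by
  intro s
  induction s with
  | zero => intro a; simp [hmInner]
  | succ s ihs =>
    intro a
    rw [List.range'_succ]
    simp only [List.map_cons, hmInner]
    rw [show a + 1 + 1 = (a + 1) + 1 from rfl, ihs (a + 1)]
    simp

theorem hmStep_C (m s : Nat) :
    hmStep (m : Int) ((List.range (s + 1)).map (ucC m)) = (List.range (s + 1)).map (ucC (m + 1)) := by
  have hrange : List.range (s + 1) = 0 :: List.range' 1 s := by
    rw [List.range_eq_range', List.range'_succ]
  rw [hrange]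
  simp only [List.map_cons, hmStep]
  rw [show (1 : Nat) = 0 + 1 from rfl, hmInner_map m (ucC m) s 0]
  congr 1
  · simp [ucC]
  · apply List.map_congr_left
    intro k hk
    have h1 : 1 ≤ k := (List.mem_range'_1.mp hk).1
    obtain ⟨j, rfl⟩ : ∃ j, k = j + 1 := ⟨k - 1, by omega⟩
    simp [hmRow, ucC]

theorem init_C : ∀ (s a : Nat), (List.range' (a + 1) s).map (ucC 0) = List.replicate s [] := by
  intro s
  induction s with
  | zero => intro a; simp
  | succ s ihs =>
    intro a
    rw [List.range'_succ, List.map_cons, ihs (a + 1)]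
    simp [ucC, List.replicate_succ]

theorem fold_C (s : Nat) : ∀ (M : Nat),
    ((List.range M).map (fun (j : Nat) => (j : Int))).foldl (fun tb m => hmStep m tb)
        ((List.range (s + 1)).map (ucC 0))
      = (List.range (s + 1)).map (ucC M) := by
  intro M
  induction M with
  | zero => simp
  | succ M ihM =>
    have h : List.range (M + 1) = List.range M ++ [M] := List.range_succ
    rw [h, List.map_append, List.foldl_append, ihM]
    simpa using hmStep_C M s

-- ===== VERDICT (by name: the statement is the Claim_ definition above) =====
theorem homogeneousMutations_spec : Claim_equal_homogeneousMutations := by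
  intro items n replaceitems _hdom
  unfold Spec_homogeneousMutations homogeneousMutations homogeneousMutations_alt
  by_cases h0 : n = 0
  · simp [h0]
  · rw [if_neg h0, if_neg h0]
    by_cases hneg : n < 0
    · rw [if_pos (Or.inl hneg), uc_neg _ _ hneg]
      simp
    · obtain ⟨s, rfl⟩ : ∃ s : Nat, n = (s : Int) := ⟨n.toNat, by omega⟩
      by_cases hbig : (s : Int) > (items.length : Int)
      · rw [if_pos (Or.inr hbig), PySem.List.pyRange_zero_natCast,
          uc_eq s items.length, ucC_big items.length s (by omega)]
        simp
      · rw [if_neg (by omega)]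
        have hpr : PySem.List.pyRange 0 (items.length : Int) 1
            = (List.range items.length).map (fun (j : Nat) => (j : Int)) :=
          PySem.List.pyRange_zero_natCast items.length
        rw [hpr, uc_eq s items.length]
        have hinit : ([[]] :: List.replicate (s : Int).toNat ([] : List (List Int)))
            = (List.range (s + 1)).map (ucC 0) := by
          rw [List.range_eq_range', List.range'_succ, List.map_cons, init_C s 0]
          simp [ucC]
        rw [hinit, fold_C s items.length]
        simp only [PySem.List.pyGetD_natCast]
        rw [PySem.List.getD_map_range (ucC items.length) (s + 1) s _ (by omega)]
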